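-- pv_equiv track=rewrite | github.com/sakshambassi/landscapelaser | landscapelaser/sharpness_util.py | generate_points_on_line
-- ===== SOURCE A (Python) =====
-- def generate_points_on_line(min_arr: int, max_arr: int, x: int, y: int, step_x: int, step_y: int):
--     """ generates list of points on a line from start point with step size given for both x and y coordinate
--
--     Args:
--         min_arr (int): minimum boundary val of arr
--         max_arr (int): maximum boundary val of arr
--         x (int): x cordinate of start point
--         y (int): y cordinate of start point
--         step_x (int): step size of x cordinate
--         step_y (int): step size of y cordinate
--
--     Returns:
--         tuple: x (list) and y (list) points on line
--     """
--     x_p, y_p = [], []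
--     while x >= min_arr and y >= min_arr and x < max_arr and y < max_arr:
--         x_p.append(x)
--         y_p.append(y)
--         x += step_x
--         y += step_y
--     return x_p, y_p
-- ===== SOURCE B (Python) =====
-- def generate_points_on_line(min_arr: int, max_arr: int, x: int, y: int, step_x: int, step_y: int):
--     """Closed-form: per-axis step count, n = min of the finite counts, then two comprehensions."""
--     def count(v, s):
--         # number of steps before v leaves [min_arr, max_arr); None = never leaves (s == 0 in range)
--         if min_arr <= v < max_arr:
--             if s > 0:
--                 return (max_arr - 1 - v) // s + 1
--             if s < 0:
--                 return (v - min_arr) // (-s) + 1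
--             return None
--         return 0
--     cx = count(x, step_x)
--     cy = count(y, step_y)
--     if cx is None:
--         n = cy
--     elif cy is None:
--         n = cx
--     else:
--         n = min(cx, cy)
--     return [x + i * step_x for i in range(n)], [y + i * step_y for i in range(n)]
-- ===== Notes on version B (the rewrite author's own statement) =====
-- stated objective: alternative
-- what changed: Replaces the incremental while-loop with a closed-form per-axis step count (floor division) and builds both lists with two range comprehensions; it decides the output length in O(1) instead of discovering it by iterating.
import Mathlib
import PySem

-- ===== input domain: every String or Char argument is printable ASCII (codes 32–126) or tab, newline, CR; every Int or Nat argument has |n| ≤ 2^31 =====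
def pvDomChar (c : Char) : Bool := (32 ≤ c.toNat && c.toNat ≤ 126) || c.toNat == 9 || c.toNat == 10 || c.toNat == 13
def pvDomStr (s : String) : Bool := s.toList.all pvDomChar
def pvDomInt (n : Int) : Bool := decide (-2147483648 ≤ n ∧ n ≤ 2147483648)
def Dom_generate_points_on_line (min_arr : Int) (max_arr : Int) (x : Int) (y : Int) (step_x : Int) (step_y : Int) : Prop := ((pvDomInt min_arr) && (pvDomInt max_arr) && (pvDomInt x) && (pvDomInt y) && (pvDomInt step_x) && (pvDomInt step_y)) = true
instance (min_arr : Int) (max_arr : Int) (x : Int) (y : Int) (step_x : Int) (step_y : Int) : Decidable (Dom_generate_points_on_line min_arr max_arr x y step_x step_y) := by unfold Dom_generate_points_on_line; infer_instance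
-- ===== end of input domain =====

-- ===== PORT A =====
-- B replaces A's incremental while-loop by a closed-form step count; equivalence is on the
-- return value; Pre_ excludes the step_x = step_y = 0 in-range inputs on which A loops forever.

-- A's while-loop; the Nat fuel only bounds the recursion, it is large enough that it is
-- never exhausted on Dom ∩ Pre_ (proved below); on exhaustion the accumulators are returned.
def pvLoopA (mn mx sx sy : Int) : Nat → Int → Int → List Int → List Int → List Int × List Int
  | 0, _, _, xp, yp => (xp, yp)
  | fuel+1, x, y, xp, yp =>
    if x ≥ mn ∧ y ≥ mn ∧ x < mx ∧ y < mx then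
      pvLoopA mn mx sx sy fuel (x + sx) (y + sy) (xp ++ [x]) (yp ++ [y])
    else (xp, yp)

def generate_points_on_line (min_arr : Int) (max_arr : Int) (x : Int) (y : Int) (step_x : Int) (step_y : Int) : List Int × List Int :=
  pvLoopA min_arr max_arr step_x step_y 17179869184 x y [] []

-- ===== PORT B =====
-- count(v, s) from Source B: steps before v leaves [mn, mx); none = never (s = 0 while in range)
def pvCnt (mn mx v s : Int) : Option Int :=
  if mn ≤ v ∧ v < mx then
    if s > 0 then some (PySem.Int.floordiv (mx - 1 - v) s + 1)
    else if s < 0 then some (PySem.Int.floordiv (v - mn) (-s) + 1)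
    else none
  else some 0

def generate_points_on_line_alt (min_arr : Int) (max_arr : Int) (x : Int) (y : Int) (step_x : Int) (step_y : Int) : List Int × List Int :=
  let n : Int :=
    match pvCnt min_arr max_arr x step_x, pvCnt min_arr max_arr y step_y with
    | none, some b => b
    | some a, none => a
    | some a, some b => min a b
    | none, none => 0   -- unreachable under Pre_ (the Python B raises TypeError here)
  ((PySem.List.pyRange 0 n 1).map (fun i => x + i * step_x),
   (PySem.List.pyRange 0 n 1).map (fun i => y + i * step_y))

-- ===== PRECONDITION & SPEC =====
-- Pre_ excludes exactly the inputs where both steps are 0 with both start coordinates in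
-- range: there A's while-loop never terminates (it returns on nothing).
def Pre_generate_points_on_line (min_arr : Int) (max_arr : Int) (x : Int) (y : Int) (step_x : Int) (step_y : Int) : Prop :=
  ¬ (step_x = 0 ∧ step_y = 0 ∧ min_arr ≤ x ∧ x < max_arr ∧ min_arr ≤ y ∧ y < max_arr)
instance (min_arr : Int) (max_arr : Int) (x : Int) (y : Int) (step_x : Int) (step_y : Int) : Decidable (Pre_generate_points_on_line min_arr max_arr x y step_x step_y) := by unfold Pre_generate_points_on_line; infer_instance

def pvWitness_generate_points_on_line : Int × Int × Int × Int × Int × Int := (0, 5, 0, 1, 1, 2)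

def Spec_generate_points_on_line (min_arr : Int) (max_arr : Int) (x : Int) (y : Int) (step_x : Int) (step_y : Int) (out : List Int × List Int) : Prop := out = generate_points_on_line_alt min_arr max_arr x y step_x step_y
instance (min_arr : Int) (max_arr : Int) (x : Int) (y : Int) (step_x : Int) (step_y : Int) (out : List Int × List Int) : Decidable (Spec_generate_points_on_line min_arr max_arr x y step_x step_y out) := by unfold Spec_generate_points_on_line; infer_instance

-- ===== CLAIM =====
def Claim_equal_generate_points_on_line : Prop := ∀ (min_arr : Int) (max_arr : Int) (x : Int) (y : Int) (step_x : Int) (step_y : Int), Dom_generate_points_on_line min_arr max_arr x y step_x step_y → Pre_generate_points_on_line min_arr max_arr x y step_x step_y → Spec_generate_points_on_line min_arr max_arr x y step_x step_y (generate_points_on_line min_arr max_arr x y step_x step_y)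

-- ===== LEMMAS AND PROOFS =====

-- combined step count of a state (none = diverging state)
def pvN (mn mx sx sy x y : Int) : Option Int :=
  match pvCnt mn mx x sx, pvCnt mn mx y sy with
  | none, some b => some b
  | some a, none => some a
  | some a, some b => some (min a b)
  | none, none => none

def pvBuild (x sx : Int) (k : Nat) : List Int :=
  (List.range k).map (fun i : Nat => x + (i : Int) * sx)

lemma pvBuild_succ (x sx : Int) (k : Nat) :
    pvBuild x sx (k+1) = x :: pvBuild (x + sx) sx k := by
  unfold pvBuild
  rw [List.range_succ_eq_map, List.map_cons, List.map_map]
  simp only [List.cons.injEq]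
  constructor
  · push_cast; ring
  · apply List.map_congr_left; intro i _
    simp only [Function.comp_apply, Nat.succ_eq_add_one]; push_cast; ring

lemma pvCnt_nonneg {mn mx v s c : Int} (h : pvCnt mn mx v s = some c) : 0 ≤ c := by
  unfold pvCnt at h
  split_ifs at h with h1 h2 h3
  · have h' := Option.some.inj h
    have : 0 ≤ PySem.Int.floordiv (mx - 1 - v) s :=
      (PySem.Int.le_floordiv_iff_mul_le h2).2 (by omega)
    omega
  · have h' := Option.some.inj h
    have : 0 ≤ PySem.Int.floordiv (v - mn) (-s) :=
      (PySem.Int.le_floordiv_iff_mul_le (by omega)).2 (by omega)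
    omega
  · have h' := Option.some.inj h; omega

lemma pvCnt_pos {mn mx v s c : Int} (hin : mn ≤ v ∧ v < mx)
    (h : pvCnt mn mx v s = some c) : 1 ≤ c := by
  unfold pvCnt at h
  rw [if_pos hin] at h
  split_ifs at h with h2 h3
  · have h' := Option.some.inj h
    have : 0 ≤ PySem.Int.floordiv (mx - 1 - v) s :=
      (PySem.Int.le_floordiv_iff_mul_le h2).2 (by omega)
    omega
  · have h' := Option.some.inj h
    have : 0 ≤ PySem.Int.floordiv (v - mn) (-s) :=
      (PySem.Int.le_floordiv_iff_mul_le (by omega)).2 (by omega)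
    omega

lemma pvCnt_out {mn mx v s : Int} (h : ¬ (mn ≤ v ∧ v < mx)) : pvCnt mn mx v s = some 0 := by
  unfold pvCnt; rw [if_neg h]

lemma pvCnt_none {mn mx v s : Int} (h : pvCnt mn mx v s = none) :
    (mn ≤ v ∧ v < mx) ∧ s = 0 := by
  unfold pvCnt at h
  split_ifs at h with h1 h2 h3
  exact ⟨h1, by omega⟩

lemma pvCnt_step {mn mx v s c : Int} (hin : mn ≤ v ∧ v < mx)
    (h : pvCnt mn mx v s = some c) : pvCnt mn mx (v + s) s = some (c - 1) := by
  unfold pvCnt at h ⊢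
  rw [if_pos hin] at h
  split_ifs at h with h2 h3
  · -- s > 0
    have h' := Option.some.inj h
    by_cases hvs : v + s < mx
    · rw [if_pos ⟨by omega, hvs⟩, if_pos h2]
      have hd := (PySem.Int.floordiv_eq_iff_of_pos h2
        (q := PySem.Int.floordiv (mx - 1 - v) s)).1 rfl
      have heq : PySem.Int.floordiv (mx - 1 - (v + s)) s
          = PySem.Int.floordiv (mx - 1 - v) s - 1 := by
        rw [PySem.Int.floordiv_eq_iff_of_pos h2]
        constructor <;> nlinarith [hd.1, hd.2]
      rw [heq]; congr 1; omega
    · rw [if_neg (by omega)]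
      have heq : PySem.Int.floordiv (mx - 1 - v) s = 0 := by
        rw [PySem.Int.floordiv_eq_iff_of_pos h2]; constructor <;> nlinarith
      congr 1; omega
  · -- s < 0
    have h' := Option.some.inj h
    have hst : (0:Int) < -s := by omega
    by_cases hvs : mn ≤ v + s
    · rw [if_pos ⟨hvs, by omega⟩, if_neg (by omega), if_pos h3]
      have hd := (PySem.Int.floordiv_eq_iff_of_pos hst
        (q := PySem.Int.floordiv (v - mn) (-s))).1 rfl
      have heq : PySem.Int.floordiv (v + s - mn) (-s)
          = PySem.Int.floordiv (v - mn) (-s) - 1 := by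
        rw [PySem.Int.floordiv_eq_iff_of_pos hst]
        constructor <;> nlinarith [hd.1, hd.2]
      rw [heq]; congr 1; omega
    · rw [if_neg (by omega)]
      have heq : PySem.Int.floordiv (v - mn) (-s) = 0 := by
        rw [PySem.Int.floordiv_eq_iff_of_pos hst]; constructor <;> nlinarith
      congr 1; omega

lemma pvN_cond_true {mn mx sx sy x y k : Int}
    (h : pvN mn mx sx sy x y = some k) (hk : 1 ≤ k) :
    (mn ≤ x ∧ x < mx) ∧ (mn ≤ y ∧ y < mx) := by
  by_contra hc
  have h0 : pvN mn mx sx sy x y = some 0 := by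
    unfold pvN
    by_cases hx : mn ≤ x ∧ x < mx
    · have hy : ¬ (mn ≤ y ∧ y < mx) := by tauto
      rw [pvCnt_out hy]
      rcases hcx : pvCnt mn mx x sx with _ | a
      · rfl
      · have := pvCnt_nonneg hcx
        show some (min a 0) = some 0
        congr 1; omega
    · rw [pvCnt_out hx]
      rcases hcy : pvCnt mn mx y sy with _ | b
      · rfl
      · have := pvCnt_nonneg hcy
        show some (min 0 b) = some 0
        congr 1; omega
  rw [h] at h0
  have := Option.some.inj h0; omega

lemma pvN_step {mn mx sx sy x y k : Int}
    (hx : mn ≤ x ∧ x < mx) (hy : mn ≤ y ∧ y < mx)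
    (h : pvN mn mx sx sy x y = some k) :
    pvN mn mx sx sy (x + sx) (y + sy) = some (k - 1) := by
  unfold pvN at h ⊢
  rcases hcx : pvCnt mn mx x sx with _ | a <;> rcases hcy : pvCnt mn mx y sy with _ | b <;>
      rw [hcx, hcy] at h
  · simp at h
  · obtain ⟨_, hsx⟩ := pvCnt_none hcx
    subst hsx
    rw [show x + 0 = x from by ring, hcx, pvCnt_step hy hcy]
    have := Option.some.inj h
    show some (b - 1) = some (k - 1)
    congr 1; omega
  · obtain ⟨_, hsy⟩ := pvCnt_none hcy
    subst hsy
    rw [show y + 0 = y from by ring, hcy, pvCnt_step hx hcx]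
    have := Option.some.inj h
    show some (a - 1) = some (k - 1)
    congr 1; omega
  · rw [pvCnt_step hx hcx, pvCnt_step hy hcy]
    have := Option.some.inj h
    show some (min (a - 1) (b - 1)) = some (k - 1)
    congr 1; omega

lemma pvLoop_eq (mn mx sx sy : Int) :
    ∀ (k fuel : Nat), k < fuel → ∀ (x y : Int) (xp yp : List Int),
      pvN mn mx sx sy x y = some (k : Int) →
      pvLoopA mn mx sx sy fuel x y xp yp = (xp ++ pvBuild x sx k, yp ++ pvBuild y sy k) := by
  intro k
  induction k with
  | zero =>
    intro fuel hf x y xp yp hN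
    obtain ⟨fuel, rfl⟩ : ∃ f, fuel = f + 1 := ⟨fuel - 1, by omega⟩
    have hcond : ¬ (x ≥ mn ∧ y ≥ mn ∧ x < mx ∧ y < mx) := by
      intro hc
      unfold pvN at hN
      rcases hcx : pvCnt mn mx x sx with _ | a <;> rcases hcy : pvCnt mn mx y sy with _ | b <;>
          rw [hcx, hcy] at hN
      · simp at hN
      · have := pvCnt_pos ⟨hc.2.1, hc.2.2.2⟩ hcy
        have := Option.some.inj hN; omega
      · have := pvCnt_pos ⟨hc.1, hc.2.2.1⟩ hcx
        have := Option.some.inj hN; omega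
      · have h1 := pvCnt_pos ⟨hc.1, hc.2.2.1⟩ hcx
        have h2 := pvCnt_pos ⟨hc.2.1, hc.2.2.2⟩ hcy
        have : min a b = (0:Int) := Option.some.inj hN
        omega
    unfold pvLoopA
    rw [if_neg hcond]
    simp [pvBuild]
  | succ k ih =>
    intro fuel hf x y xp yp hN
    obtain ⟨fuel, rfl⟩ : ∃ f, fuel = f + 1 := ⟨fuel - 1, by omega⟩
    obtain ⟨hx, hy⟩ := pvN_cond_true hN (by push_cast; omega)
    have hstep : pvN mn mx sx sy (x + sx) (y + sy) = some (k : Int) := by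
      have h' := pvN_step hx hy hN
      rw [h']; congr 1; push_cast; ring
    unfold pvLoopA
    rw [if_pos ⟨hx.1, hy.1, hx.2, hy.2⟩]
    rw [ih fuel (by omega) (x + sx) (y + sy) _ _ hstep]
    rw [pvBuild_succ, pvBuild_succ]
    simp

lemma pvCnt_bound {mn mx v s c : Int}
    (hmn : -2147483648 ≤ mn) (hmx : mx ≤ 2147483648)
    (h : pvCnt mn mx v s = some c) : c < 17179869184 := by
  unfold pvCnt at h
  split_ifs at h with h1 h2 h3
  · have h' := Option.some.inj h
    have : PySem.Int.floordiv (mx - 1 - v) s < 17179869183 := by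
      rw [PySem.Int.floordiv_lt_iff_lt_mul h2]
      nlinarith
    omega
  · have h' := Option.some.inj h
    have : PySem.Int.floordiv (v - mn) (-s) < 17179869183 := by
      rw [PySem.Int.floordiv_lt_iff_lt_mul (by omega)]
      nlinarith
    omega
  · have h' := Option.some.inj h; omega

lemma pvRange_map_eq_build (x sx n : Int) :
    (PySem.List.pyRange 0 n 1).map (fun i => x + i * sx) = pvBuild x sx n.toNat := by
  rw [PySem.List.pyRange_one, List.map_map]
  unfold pvBuild
  simp only [Int.sub_zero]
  apply List.map_congr_left
  intro i _
  simp

-- ===== VERDICT =====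
theorem generate_points_on_line_spec : Claim_equal_generate_points_on_line := by
  unfold Claim_equal_generate_points_on_line
  intro mn mx x y sx sy hdom hpre
  unfold Spec_generate_points_on_line generate_points_on_line generate_points_on_line_alt
  have hsome : ∃ n : Int, pvN mn mx sx sy x y = some n := by
    unfold pvN
    rcases hcx : pvCnt mn mx x sx with _ | a <;> rcases hcy : pvCnt mn mx y sy with _ | b
    · obtain ⟨hxin, hsx⟩ := pvCnt_none hcx
      obtain ⟨hyin, hsy⟩ := pvCnt_none hcy
      exact absurd ⟨hsx, hsy, hxin.1, hxin.2, hyin.1, hyin.2⟩ hpre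
    · exact ⟨b, rfl⟩
    · exact ⟨a, rfl⟩
    · exact ⟨min a b, rfl⟩
  obtain ⟨n, hN⟩ := hsome
  have hn0 : 0 ≤ n := by
    unfold pvN at hN
    rcases hcx : pvCnt mn mx x sx with _ | a <;> rcases hcy : pvCnt mn mx y sy with _ | b <;>
        rw [hcx, hcy] at hN
    · simp at hN
    · have := pvCnt_nonneg hcy; have := Option.some.inj hN; omega
    · have := pvCnt_nonneg hcx; have := Option.some.inj hN; omega
    · have ha := pvCnt_nonneg hcx; have hb := pvCnt_nonneg hcy
      have : min a b = n := Option.some.inj hN; omega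
  have hdom' : -2147483648 ≤ mn ∧ mx ≤ 2147483648 := by
    unfold Dom_generate_points_on_line pvDomInt at hdom
    simp only [Bool.and_eq_true, decide_eq_true_eq] at hdom
    exact ⟨hdom.1.1.1.1.1.1, hdom.1.1.1.1.2.2⟩
  have hbound : n < 17179869184 := by
    unfold pvN at hN
    rcases hcx : pvCnt mn mx x sx with _ | a <;> rcases hcy : pvCnt mn mx y sy with _ | b <;>
        rw [hcx, hcy] at hN
    · simp at hN
    · have := pvCnt_bound hdom'.1 hdom'.2 hcy
      have := Option.some.inj hN; omega
    · have := pvCnt_bound hdom'.1 hdom'.2 hcx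
      have := Option.some.inj hN; omega
    · have := pvCnt_bound hdom'.1 hdom'.2 hcx
      have : min a b = n := Option.some.inj hN
      have hb := pvCnt_bound hdom'.1 hdom'.2 hcy
      omega
  have hfuel : n.toNat < 17179869184 := by omega
  have hcast : ((n.toNat : Int)) = n := by omega
  have hA := pvLoop_eq mn mx sx sy n.toNat 17179869184 hfuel x y [] []
    (by rw [hcast]; exact hN)
  rw [hA]
  have hBn : (match pvCnt mn mx x sx, pvCnt mn mx y sy with
      | none, some b => b
      | some a, none => a
      | some a, some b => min a b
      | none, none => (0:Int)) = n := by
    unfold pvN at hN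
    rcases hcx : pvCnt mn mx x sx with _ | a <;> rcases hcy : pvCnt mn mx y sy with _ | b <;>
        rw [hcx, hcy] at hN
    · simp at hN
    · exact Option.some.inj hN
    · exact Option.some.inj hN
    · exact Option.some.inj hN
  simp only [List.nil_append, hBn]
  rw [pvRange_map_eq_build x sx n, pvRange_map_eq_build y sy n]
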